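-- pv_equiv track=rewrite | github.com/joaoprado96/code-runner | codes/funcoesnovas.py | buscar_mensagens
-- ===== SOURCE A (Python) =====
-- def buscar_mensagens(sysout, prefixos, coluna):
--     """
--     Busca mensagens na sysout que têm prefixos na coluna especificada.
--
--     Args:
--         sysout (str): A sysout a ser verificada.
--         prefixos (list): Uma lista de prefixos a serem buscados.
--         coluna (int): A coluna da sysout onde os prefixos serão procurados.
--
--     Returns:
--         list: Uma lista de mensagens encontradas.
--     """
--     linhas = sysout.split('\n')
--     mensagens_encontradas = []
--
--     for linha in linhas:
--         trecho = linha[coluna-1:coluna + max(len(prefixo) for prefixo in prefixos)]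
--         for prefixo in prefixos:
--             if trecho.startswith(prefixo):
--                 mensagens_encontradas.append(linha)
--                 break
--
--     return mensagens_encontradas
-- ===== SOURCE B (Python) =====
-- def buscar_mensagens(sysout, prefixos, coluna):
--     maxlen = 0
--     for p in prefixos:
--         maxlen = max(maxlen, len(p))
--     tamanhos = sorted(set(map(len, prefixos)))
--     conjunto = set(prefixos)
--     ini = coluna - 1
--     fim = coluna + maxlen
--     mensagens = []
--     for linha in sysout.split('\n'):
--         trecho = linha[ini:fim]
--         for t in tamanhos:
--             if trecho[:t] in conjunto:
--                 mensagens.append(linha)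
--                 break
--     return mensagens
-- ===== Notes on version B (the rewrite author's own statement) =====
-- stated objective: alternative
-- what changed: B builds the set of all prefixes and the sorted distinct prefix lengths once, then tests each line by one set-membership lookup per distinct length, instead of A's per-line linear scan over every prefix (which also recomputes max(len) on every line); per-line work is O(distinct lengths) lookups instead of O(prefixes) startswith tests, at the cost of hashing the sliced substring.
-- outside the precondition, e.g. on buscar_mensagens('abc', [], 1): A raises ValueError, B returns []
-- crash fix: On prefixos = [] the Python A raises ValueError (max() of an empty sequence); B returns []. — e.g. on buscar_mensagens("abc", [], 1): A raises ValueError, B returns []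
import Mathlib
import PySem

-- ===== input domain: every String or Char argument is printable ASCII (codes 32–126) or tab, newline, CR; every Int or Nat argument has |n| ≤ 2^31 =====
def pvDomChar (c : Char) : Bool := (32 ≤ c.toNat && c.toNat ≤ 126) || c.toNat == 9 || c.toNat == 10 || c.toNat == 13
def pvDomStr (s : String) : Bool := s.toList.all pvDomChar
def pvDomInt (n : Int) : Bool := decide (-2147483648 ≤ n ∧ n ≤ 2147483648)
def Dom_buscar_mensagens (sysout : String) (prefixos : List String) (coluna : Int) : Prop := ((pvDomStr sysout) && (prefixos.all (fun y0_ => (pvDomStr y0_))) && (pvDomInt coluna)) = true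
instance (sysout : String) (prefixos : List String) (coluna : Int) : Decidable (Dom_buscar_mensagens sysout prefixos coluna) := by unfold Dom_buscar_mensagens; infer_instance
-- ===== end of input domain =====

-- B builds the set of all prefixes and the sorted distinct prefix lengths once, then tests each line
-- with one set-membership lookup per distinct length, instead of A's per-line scan over every prefix
-- (which also recomputes max(len) on every line). Equivalence of the RETURN value is proved on all
-- inputs with prefixos ≠ [] (on [] the Python A raises ValueError).

-- ===== PORT A =====
def buscar_mensagens (sysout : String) (prefixos : List String) (coluna : Int) : List String :=
  let linhas := (PySem.Str.split? sysout "\n").getD []   -- sep "\n" ≠ "", never none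
  linhas.foldl
    (fun acc linha =>
      let trecho := PySem.Str.slice linha (some (coluna - 1))
        (some (coluna + (PySem.List.max? (prefixos.map (fun prefixo => PySem.Str.len prefixo)) (fun y => y)).getD 0))
      -- 'for prefixo in prefixos: if trecho.startswith(prefixo): append; break' = append once iff any matches
      if prefixos.any (fun prefixo => PySem.Str.startswith trecho prefixo) then acc ++ [linha] else acc)
    []

-- ===== PORT B =====
def buscar_mensagens_alt (sysout : String) (prefixos : List String) (coluna : Int) : List String :=
  let maxlen := prefixos.foldl (fun m p => max m (PySem.Str.len p)) 0
  let tamanhos : List Int := PySem.List.sorted (PySem.Set.ofList (prefixos.map (fun p => PySem.Str.len p))) (fun t => t) false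
  let conjunto : PySem.Set String := PySem.Set.ofList prefixos
  let ini := coluna - 1
  let fim := coluna + maxlen
  ((PySem.Str.split? sysout "\n").getD []).foldl
    (fun mensagens linha =>
      let trecho := PySem.Str.slice linha (some ini) (some fim)
      -- 'for t in tamanhos: if trecho[:t] in conjunto: append; break' = append once iff any length matches
      if tamanhos.any (fun t => PySem.Set.contains conjunto (PySem.Str.slice trecho none (some t)))
      then mensagens ++ [linha] else mensagens)
    []

-- ===== PRECONDITION & SPEC =====
-- Pre_ excludes only prefixos = [], on which Python A raises ValueError (max() of an empty sequence).
def Pre_buscar_mensagens (sysout : String) (prefixos : List String) (coluna : Int) : Prop := prefixos ≠ []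
instance (sysout : String) (prefixos : List String) (coluna : Int) : Decidable (Pre_buscar_mensagens sysout prefixos coluna) := by unfold Pre_buscar_mensagens; infer_instance
def pvWitness_buscar_mensagens : String × List String × Int := ("ERRO disco\nOK tudo bem\nERRO rede", ["ERRO", "AVISO"], 1)

-- On prefixos = [] the Python A raises ValueError (max of empty sequence); B returns [].
def Raises_buscar_mensagens (sysout : String) (prefixos : List String) (coluna : Int) : Prop := prefixos = []
instance (sysout : String) (prefixos : List String) (coluna : Int) : Decidable (Raises_buscar_mensagens sysout prefixos coluna) := by unfold Raises_buscar_mensagens; infer_instance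
def pvRaiseWitness_buscar_mensagens : String × List String × Int := ("abc", [], 1)
def pvRaiseWitnessOut_buscar_mensagens : List String := []

def Spec_buscar_mensagens (sysout : String) (prefixos : List String) (coluna : Int) (out : List String) : Prop := out = buscar_mensagens_alt sysout prefixos coluna
instance (sysout : String) (prefixos : List String) (coluna : Int) (out : List String) : Decidable (Spec_buscar_mensagens sysout prefixos coluna out) := by unfold Spec_buscar_mensagens; infer_instance

-- ===== CLAIM (what is proved, stated in full; the proofs are below) =====
def Claim_equal_buscar_mensagens : Prop := ∀ (sysout : String) (prefixos : List String) (coluna : Int), Dom_buscar_mensagens sysout prefixos coluna → Pre_buscar_mensagens sysout prefixos coluna → Spec_buscar_mensagens sysout prefixos coluna (buscar_mensagens sysout prefixos coluna)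
def Claim_raises_buscar_mensagens : Prop := (∀ (sysout : String) (prefixos : List String) (coluna : Int), Dom_buscar_mensagens sysout prefixos coluna → Raises_buscar_mensagens sysout prefixos coluna → ¬ Pre_buscar_mensagens sysout prefixos coluna) ∧ (Dom_buscar_mensagens (pvRaiseWitness_buscar_mensagens.1) (pvRaiseWitness_buscar_mensagens.2.1) (pvRaiseWitness_buscar_mensagens.2.2) ∧ Raises_buscar_mensagens (pvRaiseWitness_buscar_mensagens.1) (pvRaiseWitness_buscar_mensagens.2.1) (pvRaiseWitness_buscar_mensagens.2.2) ∧ buscar_mensagens_alt (pvRaiseWitness_buscar_mensagens.1) (pvRaiseWitness_buscar_mensagens.2.1) (pvRaiseWitness_buscar_mensagens.2.2) = pvRaiseWitnessOut_buscar_mensagens)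

-- ===== LEMMAS AND PROOFS =====

-- A's max(len(p) for p in prefixos) equals B's running max started at 0, for nonempty prefixos.
lemma maxlen_eq (p : String) (ps : List String) :
    (PySem.List.max? ((p :: ps).map (fun q => PySem.Str.len q)) (fun y => y)).getD 0
      = (p :: ps).foldl (fun m q => max m (PySem.Str.len q)) 0 := by
  simp [PySem.List.max?_id_cons, List.foldl_map]

-- the per-line tests agree: some prefix is a prefix of trecho iff for some distinct prefix length t,
-- trecho[:t] is in the set of all prefixes.
lemma pred_eq (prefixos : List String) (trecho : String) :
    (prefixos.any (fun prefixo => PySem.Str.startswith trecho prefixo))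
      = ((PySem.List.sorted (PySem.Set.ofList (prefixos.map (fun p => PySem.Str.len p))) (fun t => t) false).any (fun t =>
          PySem.Set.contains (PySem.Set.ofList prefixos) (PySem.Str.slice trecho none (some t)))) := by
  rw [Bool.eq_iff_iff]
  simp only [List.any_eq_true, PySem.Set.contains_iff, PySem.Set.mem_ofList, List.mem_map,
    (PySem.List.sorted_perm _ _ _).mem_iff, PySem.Str.startswith_eq, PySem.Chars.startswith_iff]
  constructor
  · rintro ⟨q, hq, hpre⟩
    refine ⟨PySem.Str.len q, ⟨q, hq, rfl⟩, ?_⟩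
    have : (PySem.Str.slice trecho none (some (PySem.Str.len q))) = q := by
      apply String.toList_inj.mp
      rw [PySem.Str.toList_slice, PySem.Chars.slice_eq_listSlice, PySem.Str.len_eq,
        PySem.List.slice_to_natCast]
      exact (List.prefix_iff_eq_take.mp hpre).symm
    rw [this]; exact hq
  · rintro ⟨t, ⟨q, hq, rfl⟩, hmem⟩
    refine ⟨_, hmem, ?_⟩
    rw [PySem.Str.toList_slice, PySem.Chars.slice_eq_listSlice, PySem.Str.len_eq,
      PySem.List.slice_to_natCast]
    exact List.take_prefix _ _

-- ===== VERDICT (by name: the statement is the Claim_ definition above) =====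
theorem buscar_mensagens_spec : Claim_equal_buscar_mensagens := by
  intro sysout prefixos coluna _ hpre
  unfold Spec_buscar_mensagens buscar_mensagens buscar_mensagens_alt
  obtain ⟨p, ps, rfl⟩ : ∃ p ps, prefixos = p :: ps := by
    cases prefixos with
    | nil => exact absurd rfl hpre
    | cons p ps => exact ⟨p, ps, rfl⟩
  simp only [maxlen_eq]
  rw [PySem.List.foldl_append_if_eq_filter
    (fun linha => (p :: ps).any (fun prefixo => PySem.Str.startswith
      (PySem.Str.slice linha (some (coluna - 1))
        (some (coluna + (p :: ps).foldl (fun m q => max m (PySem.Str.len q)) 0))) prefixo))]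
  rw [PySem.List.foldl_append_if_eq_filter
    (fun linha => (PySem.List.sorted (PySem.Set.ofList ((p :: ps).map (fun q => PySem.Str.len q))) (fun t => t) false).any
      (fun t => PySem.Set.contains (PySem.Set.ofList (p :: ps))
        (PySem.Str.slice (PySem.Str.slice linha (some (coluna - 1))
          (some (coluna + (p :: ps).foldl (fun m q => max m (PySem.Str.len q)) 0))) none (some t))))]
  rw [List.nil_append, List.nil_append]
  exact List.filter_congr (fun linha _ => pred_eq (p :: ps) _)

def buscar_mensagens_raises : Claim_raises_buscar_mensagens := by
  unfold Claim_raises_buscar_mensagens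
  exact ⟨fun _ _ _ _ h => by simpa [Pre_buscar_mensagens] using h, by decide⟩
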